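-- pv_equiv track=rewrite | github.com/Emasoft/emasoft-integrator-agent | skills/int-github-pr-context/scripts/atlas_get_pr_diff.py | filter_diff_by_files
-- ===== SOURCE A (Python) =====
-- def filter_diff_by_files(diff_text: str, files: list[str]) -> str:
--     """Extract only diffs for specified files."""
--     result_lines: list[str] = []
--     include_current = False
--
--     for line in diff_text.split("\n"):
--         if line.startswith("diff --git"):
--             include_current = False
--             for f in files:
--                 if f in line:
--                     include_current = True
--                     break
--
--         if include_current:
--             result_lines.append(line)
--
--     return "\n".join(result_lines)
-- ===== SOURCE B (Python) =====
-- def _is_header(line):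
--     return line.startswith("diff --git")
--
--
-- def filter_diff_by_files(diff_text: str, files: list[str]) -> str:
--     """Extract only diffs for specified files (segment-based grouping)."""
--     lines = diff_text.split("\n")
--     # discard the preamble before the first "diff --git" header
--     while lines and not _is_header(lines[0]):
--         lines = lines[1:]
--     out = []
--     while lines:
--         header = lines[0]
--         k = 1
--         while k < len(lines) and not _is_header(lines[k]):
--             k += 1
--         if any(f in header for f in files):
--             out.extend(lines[:k])
--         lines = lines[k:]
--     return "\n".join(out)
-- ===== Notes on version B (the rewrite author's own statement) =====
-- stated objective: alternative
-- what changed: Replaces the single pass with a running include_current flag by an explicit segmentation: drop the preamble, split the remaining lines into per-header segments, keep each whole segment whose header line contains one of the files, and join the kept lines.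
import Mathlib
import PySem

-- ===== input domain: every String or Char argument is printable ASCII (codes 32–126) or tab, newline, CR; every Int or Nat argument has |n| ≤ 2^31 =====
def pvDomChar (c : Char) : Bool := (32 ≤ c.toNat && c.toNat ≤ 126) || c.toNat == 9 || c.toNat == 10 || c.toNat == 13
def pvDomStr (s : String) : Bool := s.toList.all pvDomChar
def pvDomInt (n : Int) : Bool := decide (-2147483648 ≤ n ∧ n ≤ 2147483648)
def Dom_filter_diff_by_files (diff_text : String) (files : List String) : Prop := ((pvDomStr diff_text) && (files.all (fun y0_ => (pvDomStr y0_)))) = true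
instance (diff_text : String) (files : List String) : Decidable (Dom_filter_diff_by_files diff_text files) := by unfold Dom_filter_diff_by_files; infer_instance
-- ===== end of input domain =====

-- B replaces A's running include_current flag with explicit per-header segmentation then filtering; same cost, different decomposition.

-- ===== PORT A =====
-- A's loop: state = (result_lines, include_current); the inner 'for f in files: … break' is files.any.
def pvALoop (files : List String) : List String → List String → Bool → List String
  | [], res, _ => res
  | l :: rest, res, inc =>
    let inc' := if PySem.Str.startswith l "diff --git" then files.any (fun f => PySem.Str.isIn f l) else inc
    pvALoop files rest (if inc' then res ++ [l] else res) inc'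

def filter_diff_by_files (diff_text : String) (files : List String) : String :=
  PySem.Str.join "\n" (pvALoop files ((PySem.Str.split? diff_text "\n").getD []) [] false)

-- ===== PORT B =====
def pvIsHeader (l : String) : Bool := PySem.Str.startswith l "diff --git"

-- B's outer while: lines starts at a header; take its segment (inner while = takeWhile), keep it if the header matches.
def pvBSegs (files : List String) : List String → List String
  | [] => []
  | l :: rest =>
    (if files.any (fun f => PySem.Str.isIn f l) then l :: rest.takeWhile (fun x => !pvIsHeader x) else [])
      ++ pvBSegs files (rest.dropWhile (fun x => !pvIsHeader x))
termination_by lines => lines.length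
decreasing_by
  have := List.length_dropWhile_le (fun x => !pvIsHeader x) rest
  simp; omega

def filter_diff_by_files_alt (diff_text : String) (files : List String) : String :=
  let lines := (PySem.Str.split? diff_text "\n").getD []
  PySem.Str.join "\n" (pvBSegs files (lines.dropWhile (fun x => !pvIsHeader x)))

-- ===== PRECONDITION & SPEC =====
def Spec_filter_diff_by_files (diff_text : String) (files : List String) (out : String) : Prop := out = filter_diff_by_files_alt diff_text files
instance (diff_text : String) (files : List String) (out : String) : Decidable (Spec_filter_diff_by_files diff_text files out) := by unfold Spec_filter_diff_by_files; infer_instance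

-- ===== CLAIM (what is proved, stated in full; the proofs are below) =====
def Claim_equal_filter_diff_by_files : Prop := ∀ (diff_text : String) (files : List String), Dom_filter_diff_by_files diff_text files → Spec_filter_diff_by_files diff_text files (filter_diff_by_files diff_text files)

-- ===== LEMMAS AND PROOFS =====

theorem pvBSegs_nil (files : List String) : pvBSegs files [] = [] := by
  rw [pvBSegs.eq_def]

theorem pvBSegs_cons (files : List String) (l : String) (rest : List String) :
    pvBSegs files (l :: rest) =
      (if files.any (fun f => PySem.Str.isIn f l) then l :: rest.takeWhile (fun x => !pvIsHeader x) else [])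
        ++ pvBSegs files (rest.dropWhile (fun x => !pvIsHeader x)) := by
  rw [pvBSegs.eq_def]

-- A's flag loop, from any accumulator and flag, produces: the accumulator, then (if the flag is on)
-- the rest of the current segment, then exactly B's segmentation of the remaining lines.
theorem pvALoop_eq_segs (files : List String) : ∀ (lines res : List String) (inc : Bool),
    pvALoop files lines res inc =
      res ++ (if inc then lines.takeWhile (fun x => !pvIsHeader x) else [])
          ++ pvBSegs files (lines.dropWhile (fun x => !pvIsHeader x)) := by
  intro lines
  induction lines with
  | nil => intro res inc; cases inc <;> simp [pvALoop, pvBSegs_nil]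
  | cons l rest ih =>
    intro res inc
    rw [pvALoop]
    cases h : pvIsHeader l with
    | true =>
      have h' : PySem.Str.startswith l "diff --git" = true := h
      simp only [h', if_true]
      rw [ih, List.dropWhile_cons, List.takeWhile_cons]
      simp only [h, Bool.not_true, Bool.false_eq_true, if_false]
      rw [pvBSegs_cons]
      by_cases hk : (files.any fun f => PySem.Str.isIn f l) = true
      · simp only [hk, if_true]
        simp
      · simp only [Bool.not_eq_true] at hk
        simp only [hk, Bool.false_eq_true, if_false]
        simp
    | false =>
      have h' : PySem.Str.startswith l "diff --git" = false := h
      simp only [h', Bool.false_eq_true, if_false]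
      rw [ih, List.dropWhile_cons, List.takeWhile_cons]
      simp only [h, Bool.not_false]
      cases inc <;> simp

-- ===== VERDICT (by name: the statement is the Claim_ definition above) =====
theorem filter_diff_by_files_spec : Claim_equal_filter_diff_by_files := by
  intro diff_text files _
  unfold Spec_filter_diff_by_files filter_diff_by_files filter_diff_by_files_alt
  rw [pvALoop_eq_segs]
  simp
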